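-- pv_equiv track=rewrite | github.com/KWAKMANBO/Programmers | 프로그래머스/2/132265. 롤케이크 자르기/롤케이크 자르기.py | solution
-- ===== SOURCE A (Python) =====
-- def solution(topping):
--     l = {}
--     r = {}
--
--     answer = 0
--
--     # l 에 모든 토핑 갯수를 저장해서 넣어두기
--     for i in topping:
--         if i in l:
--             l[i] += 1
--         else:
--             l[i] = 1
--
--     for i in range(len(topping)):
--         if topping[i] in r:
--             r[topping[i]] += 1
--         else:
--             r[topping[i]] = 1
--
--         l[topping[i]] -= 1
--
--         if l[topping[i]] == 0:
--             del (l[topping[i]])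
--
--         if len(l) == len(r):
--             answer += 1
--
--     return answer
-- ===== SOURCE B (Python) =====
-- def solution(topping):
--     # suffix-distinct table + one growing prefix set, instead of two coupled count dicts
--     right = [0]
--     seen = set()
--     for t in reversed(topping):
--         seen.add(t)
--         right.append(len(seen))
--     right.reverse()  # right[j] = number of distinct toppings in topping[j:]
--     left = set()
--     answer = 0
--     for t, rd in zip(topping, right[1:]):
--         left.add(t)
--         if len(left) == rd:
--             answer += 1
--     return answer
-- ===== Notes on version B (the rewrite author's own statement) =====
-- stated objective: alternative
-- what changed: Replaces A's two coupled count-dicts (decrement/delete on the left while incrementing the right) with a precomputed suffix-distinct table built backwards with a set plus one forward pass over a growing prefix set.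
import Mathlib
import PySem

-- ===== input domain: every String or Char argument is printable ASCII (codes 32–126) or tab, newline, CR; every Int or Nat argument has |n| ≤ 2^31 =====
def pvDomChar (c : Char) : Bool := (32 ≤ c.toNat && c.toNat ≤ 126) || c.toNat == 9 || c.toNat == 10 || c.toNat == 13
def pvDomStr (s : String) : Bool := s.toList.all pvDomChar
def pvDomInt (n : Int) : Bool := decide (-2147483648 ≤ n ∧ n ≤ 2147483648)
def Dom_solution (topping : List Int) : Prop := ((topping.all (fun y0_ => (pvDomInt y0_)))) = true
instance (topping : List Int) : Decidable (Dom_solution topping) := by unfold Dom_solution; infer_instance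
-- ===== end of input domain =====

-- B replaces A's two coupled count-dicts with a suffix-distinct table plus one growing prefix set (alternative decomposition, same O(n) cost; return value only, no mutation).

-- ===== PORT A =====
-- first loop: 'for i in topping: if i in l: l[i]+=1 else: l[i]=1'
def aCount (topping : List Int) : PySem.Dict Int Int :=
  topping.foldl (fun l i => if l.contains i then l.modify i 0 (· + 1) else l.insert i 1)
    PySem.Dict.empty

-- body of 'for i in range(len(topping))': reads topping[i] for i = 0..n-1, i.e. the elements
-- of topping in order, so the loop is ported as a fold over topping itself.
-- 'l[topping[i]] -= 1' is ported as modify with default 0; the key is always present there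
-- (every remaining element still has a positive count), so this is exact.
def aStep (st : PySem.Dict Int Int × PySem.Dict Int Int × Int) (x : Int) :
    PySem.Dict Int Int × PySem.Dict Int Int × Int :=
  let r := if st.2.1.contains x then st.2.1.modify x 0 (· + 1) else st.2.1.insert x 1
  let l := st.1.modify x 0 (· - 1)
  let l := if l.getD x 0 = 0 then l.erase x else l
  (l, r, if l.size = r.size then st.2.2 + 1 else st.2.2)

def solution (topping : List Int) : Int :=
  (topping.foldl aStep (aCount topping, PySem.Dict.empty, 0)).2.2

-- ===== PORT B =====
-- 'for t in reversed(topping): seen.add(t); right.append(len(seen))'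
def bSuffixStep (p : PySem.Set Int × List Int) (t : Int) : PySem.Set Int × List Int :=
  let seen := PySem.Set.add p.1 t
  (seen, p.2 ++ [PySem.Set.len seen])

-- 'for t, rd in zip(topping, right[1:]): left.add(t); if len(left) == rd: answer += 1'
def bCountStep (q : PySem.Set Int × Int) (pr : Int × Int) : PySem.Set Int × Int :=
  let left := PySem.Set.add q.1 pr.1
  (left, if PySem.Set.len left = pr.2 then q.2 + 1 else q.2)

def solution_alt (topping : List Int) : Int :=
  let right := (topping.reverse.foldl bSuffixStep (PySem.Set.empty, [(0 : Int)])).2.reverse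
  ((topping.zip (PySem.List.slice right (some 1) none)).foldl bCountStep (PySem.Set.empty, 0)).2

-- ===== PRECONDITION & SPEC =====
def Spec_solution (topping : List Int) (out : Int) : Prop := out = solution_alt topping
instance (topping : List Int) (out : Int) : Decidable (Spec_solution topping out) := by unfold Spec_solution; infer_instance

-- ===== CLAIM (what is proved, stated in full; the proofs are below) =====
def Claim_equal_solution : Prop := ∀ (topping : List Int), Dom_solution topping → Spec_solution topping (solution topping)

-- ===== LEMMAS AND PROOFS =====

-- number of distinct elements of a list
def dl (xs : List Int) : Nat := xs.toFinset.card

-- reference count: splits of p ++ s that cut inside s, recursively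
def refFrom : List Int → List Int → Int
  | _, [] => 0
  | p, x :: s => (if dl (p ++ [x]) = dl s then 1 else 0) + refFrom (p ++ [x]) s

-- the suffix-distinct values B pairs the elements with
def sufCnt : List Int → List Int
  | [] => []
  | _ :: s => ((dl s : Int)) :: sufCnt s

lemma dl_nil : dl [] = 0 := by simp [dl]

lemma setlen (xs : List Int) : (PySem.Set.ofList xs).length = dl xs := by
  rw [dl, ← List.toFinset_card_of_nodup (PySem.Set.nodup_ofList xs)]
  congr 1
  ext y
  simp [PySem.Set.mem_ofList]

lemma ofList_append_singleton (u : List Int) (x : Int) :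
    PySem.Set.ofList (u ++ [x]) = PySem.Set.add (PySem.Set.ofList u) x := by
  simp [PySem.Set.ofList_eq_foldl, List.foldl_append]

lemma dl_eq_of_mem_iff {xs ys : List Int} (hx : xs.Nodup) (h : ∀ y, y ∈ xs ↔ y ∈ ys) :
    xs.length = dl ys := by
  rw [← List.toFinset_card_of_nodup hx, dl]
  congr 1
  ext y
  simp [h y]

lemma size_eq_keys_length (d : PySem.Dict Int Int) : d.size = d.keys.length := by
  simp [PySem.Dict.size, PySem.Dict.keys]

lemma keys_erase (d : PySem.Dict Int Int) (k : Int) :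
    (d.erase k).keys = d.keys.filter (fun y => !(y == k)) := by
  simp [PySem.Dict.erase, PySem.Dict.keys, List.filter_map, Function.comp_def]

lemma mem_keys_erase (d : PySem.Dict Int Int) (k y : Int) :
    y ∈ (d.erase k).keys ↔ y ∈ d.keys ∧ y ≠ k := by
  rw [keys_erase]
  simp [List.mem_filter]

lemma nodup_keys_erase (d : PySem.Dict Int Int) (k : Int) (h : d.keys.Nodup) :
    (d.erase k).keys.Nodup := by
  rw [keys_erase]
  exact h.filter _

lemma getD_erase_self (d : PySem.Dict Int Int) (k : Int) : (d.erase k).getD k 0 = 0 := by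
  apply PySem.Dict.getD_of_not_contains
  cases hc : (d.erase k).contains k with
  | false => rfl
  | true =>
    exact absurd (((mem_keys_erase d k k).1 ((PySem.Dict.contains_iff_mem_keys _ _).1 hc)).2) (by simp)

lemma getD_erase_of_ne (d : PySem.Dict Int Int) (k y : Int) (hnd : d.keys.Nodup) (hy : y ≠ k) :
    (d.erase k).getD y 0 = d.getD y 0 := by
  by_cases hm : y ∈ d.keys
  · obtain ⟨⟨y', v⟩, hpv, hfst⟩ := List.mem_map.1 hm
    subst hfst
    have hin : (y', v) ∈ (d.erase k).items := by
      simp only [PySem.Dict.erase, List.mem_filter]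
      exact ⟨hpv, by simpa using hy⟩
    rw [PySem.Dict.getD_of_mem_items _ hin (nodup_keys_erase d k hnd),
        PySem.Dict.getD_of_mem_items _ hpv hnd]
  · have h1 : d.contains y = false := by
      cases hc : d.contains y with
      | false => rfl
      | true => exact absurd ((PySem.Dict.contains_iff_mem_keys _ _).1 hc) hm
    have h2 : (d.erase k).contains y = false := by
      cases hc : (d.erase k).contains y with
      | false => rfl
      | true => exact absurd (((mem_keys_erase d k y).1 ((PySem.Dict.contains_iff_mem_keys _ _).1 hc)).1) hm
    rw [PySem.Dict.getD_of_not_contains _ _ h1, PySem.Dict.getD_of_not_contains _ _ h2]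

lemma aCount_eq_counter (t : List Int) : aCount t = PySem.Dict.counter t := by
  rw [PySem.Dict.counter_eq_foldl, aCount]
  congr 1
  funext d i
  by_cases hc : d.contains i = true
  · simp [hc]
  · have hb : d.contains i = false := by simpa using hc
    rw [if_neg hc, PySem.Dict.modify, PySem.Dict.getD_of_not_contains _ _ hb]
    norm_num

lemma aloop (s : List Int) : ∀ (p : List Int) (l r : PySem.Dict Int Int) (ans : Int),
    r.keys = PySem.Set.ofList p →
    l.keys.Nodup →
    (∀ y, y ∈ l.keys ↔ y ∈ s) →
    (∀ y : Int, l.getD y 0 = (s.count y : Int)) →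
    (s.foldl aStep (l, r, ans)).2.2 = ans + refFrom p s := by
  induction s with
  | nil => intro p l r ans _ _ _ _; simp [refFrom]
  | cons x s ih =>
    intro p l r ans hr hnd hmem hcnt
    have hxk : x ∈ l.keys := (hmem x).2 (by simp)
    have hcxk : l.contains x = true := (PySem.Dict.contains_iff_mem_keys _ _).2 hxk
    -- the updated right dict
    have hr'keys : (if r.contains x then r.modify x 0 (· + 1) else r.insert x 1).keys
        = PySem.Set.ofList (p ++ [x]) := by
      rw [ofList_append_singleton, PySem.Set.add_eq_ite]
      by_cases hc : r.contains x = true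
      · have hx : x ∈ PySem.Set.ofList p := hr ▸ (PySem.Dict.contains_iff_mem_keys _ _).1 hc
        rw [if_pos hc, if_pos hx, PySem.Dict.keys_modify,
            PySem.Dict.keys_insert_of_contains _ _ hc, hr]
      · have hb : r.contains x = false := by simpa using hc
        have hx : x ∉ PySem.Set.ofList p := fun hmm =>
          hc ((PySem.Dict.contains_iff_mem_keys _ _).2 (hr ▸ hmm))
        rw [if_neg hc, if_neg hx, PySem.Dict.keys_insert_of_not_contains _ _ hb, hr]
    -- the decremented left dict
    have hl1keys : (l.modify x 0 (· - 1)).keys = l.keys := by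
      rw [PySem.Dict.keys_modify, PySem.Dict.keys_insert_of_contains _ _ hcxk]
    have hl1getD : ∀ y : Int, (l.modify x 0 (· - 1)).getD y 0 = (s.count y : Int) := by
      intro y
      rw [PySem.Dict.getD_modify]
      by_cases hyx : y = x
      · subst hyx
        rw [if_pos rfl, hcnt y]
        simp [List.count_cons_self]
      · rw [if_neg hyx, hcnt y]
        congr 1
        exact List.count_cons_of_ne (fun h => hyx h.symm)
    have hl1x : (l.modify x 0 (· - 1)).getD x 0 = (s.count x : Int) := hl1getD x
    -- the left dict after the conditional delete
    have hl2 :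
        ((if (l.modify x 0 (· - 1)).getD x 0 = 0 then (l.modify x 0 (· - 1)).erase x
          else l.modify x 0 (· - 1)).keys.Nodup) ∧
        (∀ y, y ∈ (if (l.modify x 0 (· - 1)).getD x 0 = 0 then (l.modify x 0 (· - 1)).erase x
          else l.modify x 0 (· - 1)).keys ↔ y ∈ s) ∧
        (∀ y : Int, (if (l.modify x 0 (· - 1)).getD x 0 = 0 then (l.modify x 0 (· - 1)).erase x
          else l.modify x 0 (· - 1)).getD y 0 = (s.count y : Int)) := by
      by_cases hz : s.count x = 0
      · have hxns : x ∉ s := by simpa using List.count_eq_zero.1 hz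
        have hcond : (l.modify x 0 (· - 1)).getD x 0 = 0 := by rw [hl1x, hz]; simp
        rw [if_pos hcond]
        refine ⟨nodup_keys_erase _ _ (hl1keys ▸ hnd), ?_, ?_⟩
        · intro y
          rw [mem_keys_erase, hl1keys, hmem y]
          constructor
          · rintro ⟨hy, hne⟩
            rcases List.mem_cons.1 hy with h | h
            · exact absurd h hne
            · exact h
          · intro hy
            exact ⟨List.mem_cons_of_mem _ hy, fun he => hxns (he ▸ hy)⟩
        · intro y
          by_cases hyx : y = x
          · subst hyx; rw [getD_erase_self, hz]; simp
          · rw [getD_erase_of_ne _ _ _ (hl1keys ▸ hnd) hyx, hl1getD y]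
      · have hcond : ¬ (l.modify x 0 (· - 1)).getD x 0 = 0 := by
          rw [hl1x]
          exact_mod_cast hz
        rw [if_neg hcond]
        refine ⟨hl1keys ▸ hnd, ?_, hl1getD⟩
        intro y
        rw [hl1keys, hmem y]
        by_cases hyx : y = x
        · subst hyx
          simp [List.count_pos_iff.1 (Nat.pos_of_ne_zero hz)]
        · simp [hyx]
    obtain ⟨hnd2, hmem2, hcnt2⟩ := hl2
    have hs2 : (if (l.modify x 0 (· - 1)).getD x 0 = 0 then (l.modify x 0 (· - 1)).erase x
          else l.modify x 0 (· - 1)).size = dl s := by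
      rw [size_eq_keys_length]
      exact dl_eq_of_mem_iff hnd2 hmem2
    have hs1 : (if r.contains x then r.modify x 0 (· + 1) else r.insert x 1).size = dl (p ++ [x]) := by
      rw [size_eq_keys_length, hr'keys, setlen]
    rw [List.foldl_cons]
    show ((s.foldl aStep _).2.2) = _
    rw [aStep]
    rw [ih (p ++ [x]) _ _ _ hr'keys hnd2 hmem2 hcnt2, refFrom]
    rw [hs2, hs1]
    by_cases hdl : dl (p ++ [x]) = dl s
    · rw [if_pos hdl.symm, if_pos hdl]; ring
    · rw [if_neg (fun h => hdl h.symm), if_neg hdl]; ring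

lemma solution_eq_ref (t : List Int) : solution t = refFrom [] t := by
  rw [solution]
  rw [aloop t [] (aCount t) PySem.Dict.empty 0 rfl
      (aCount_eq_counter t ▸ PySem.Dict.nodup_keys_counter t)
      (fun y => by rw [aCount_eq_counter, PySem.Dict.keys_counter, PySem.Set.mem_ofList])
      (fun y => by rw [aCount_eq_counter, PySem.Dict.getD_counter])]
  ring

lemma revloop (l : List Int) : ∀ (u acc : List Int),
    l.foldl bSuffixStep (PySem.Set.ofList u, acc) =
      (PySem.Set.ofList (u ++ l),
       acc ++ (List.range l.length).map (fun k => ((dl (u ++ l.take (k + 1)) : Nat) : Int))) := by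
  induction l with
  | nil => intro u acc; simp
  | cons x l ih =>
    intro u acc
    rw [List.foldl_cons]
    show l.foldl bSuffixStep
        (PySem.Set.add (PySem.Set.ofList u) x,
         acc ++ [PySem.Set.len (PySem.Set.add (PySem.Set.ofList u) x)]) = _
    rw [← ofList_append_singleton]
    have hlen : PySem.Set.len (PySem.Set.ofList (u ++ [x])) = ((dl (u ++ [x]) : Nat) : Int) := by
      rw [PySem.Set.len, setlen]
    rw [hlen, ih (u ++ [x])]
    refine Prod.ext (by simp) ?_
    dsimp only
    rw [List.length_cons, List.range_succ_eq_map, List.map_cons, List.map_map, List.append_assoc,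
        List.singleton_append]
    congr 1
    congr 1
    refine List.map_congr_left ?_
    intro k _
    simp [Nat.succ_eq_add_one, List.take_succ_cons, List.append_assoc]

lemma sufCnt_length (s : List Int) : (sufCnt s).length = s.length := by
  induction s with
  | nil => rfl
  | cons x s ih => simp [sufCnt, ih]

lemma sufCnt_getElem (s : List Int) : ∀ (i : Nat) (h : i < (sufCnt s).length),
    (sufCnt s)[i] = ((dl (s.drop (i + 1)) : Nat) : Int) := by
  induction s with
  | nil => intro i h; simp [sufCnt] at h
  | cons x s ih =>
    intro i h
    cases i with
    | zero => simp [sufCnt]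
    | succ j =>
      have hj : j < (sufCnt s).length := by
        simpa [sufCnt] using h
      show (sufCnt s)[j] = _
      rw [ih j hj]
      rfl

lemma rd_eq (t : List Int) :
    ((((0 : Int) :: (List.range t.length).map
        (fun k => ((dl (t.reverse.take (k + 1)) : Nat) : Int))).reverse).drop 1) = sufCnt t := by
  apply List.ext_getElem?
  intro i
  rw [List.getElem?_drop]
  by_cases hi : i < t.length
  · rw [List.getElem?_reverse (by simp; omega)]
    simp only [List.length_cons, List.length_map, List.length_range]
    rw [List.getElem?_eq_getElem (by simp [sufCnt_length]; omega : i < (sufCnt t).length)]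
    rw [sufCnt_getElem t i (by simp [sufCnt_length]; omega)]
    by_cases hlast : i + 1 = t.length
    · rw [show t.length + 1 - 1 - (1 + i) = 0 from by omega, List.getElem?_cons_zero]
      rw [show i + 1 = t.length from hlast, List.drop_length, dl_nil]
      simp
    · rw [show t.length + 1 - 1 - (1 + i) = (t.length - 2 - i) + 1 from by omega,
          List.getElem?_cons_succ, List.getElem?_map,
          List.getElem?_range (by omega : t.length - 2 - i < t.length)]
      simp only [Option.map_some]
      rw [show t.length - 2 - i + 1 = t.length - 1 - i from by omega, List.take_reverse,
          show t.length - (t.length - 1 - i) = i + 1 from by omega]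
      simp [dl]
  · rw [List.getElem?_eq_none (by simp; omega), List.getElem?_eq_none (by simp [sufCnt_length]; omega)]

lemma bloop (s : List Int) : ∀ (p : List Int) (ans : Int),
    ((s.zip (sufCnt s)).foldl bCountStep (PySem.Set.ofList p, ans)).2 = ans + refFrom p s := by
  induction s with
  | nil => intro p ans; simp [sufCnt, refFrom]
  | cons x s ih =>
    intro p ans
    rw [sufCnt, List.zip_cons_cons, List.foldl_cons]
    show ((s.zip (sufCnt s)).foldl bCountStep
        (PySem.Set.add (PySem.Set.ofList p) x,
         if PySem.Set.len (PySem.Set.add (PySem.Set.ofList p) x) = ((dl s : Nat) : Int)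
         then ans + 1 else ans)).2 = _
    rw [← ofList_append_singleton]
    have hlen : PySem.Set.len (PySem.Set.ofList (p ++ [x])) = ((dl (p ++ [x]) : Nat) : Int) := by
      rw [PySem.Set.len, setlen]
    rw [hlen, ih (p ++ [x]), refFrom]
    by_cases hdl : dl (p ++ [x]) = dl s
    · rw [if_pos (by exact_mod_cast hdl), if_pos hdl]; ring
    · rw [if_neg (fun h => hdl (by exact_mod_cast h)), if_neg hdl]; ring

lemma solution_alt_eq_ref (t : List Int) : solution_alt t = refFrom [] t := by
  rw [solution_alt]
  have h0 : (PySem.Set.empty : PySem.Set Int) = PySem.Set.ofList [] := rfl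
  rw [h0, revloop]
  simp only [List.nil_append, List.length_reverse]
  rw [PySem.List.slice_from _ (by norm_num)]
  show ((t.zip ((((0 : Int) :: (List.range t.length).map
      (fun k => ((dl (t.reverse.take (k + 1)) : Nat) : Int))).reverse).drop 1)).foldl
      bCountStep (PySem.Set.ofList [], 0)).2 = _
  rw [rd_eq, bloop]
  ring

-- ===== VERDICT (by name: the statement is the Claim_ definition above) =====
theorem solution_spec : Claim_equal_solution := by
  intro t _
  unfold Spec_solution
  rw [solution_eq_ref, solution_alt_eq_ref]
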